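-- pv_equiv track=rewrite | github.com/Jonator3/EduNLP_CLCS | data_analysis/n_gram.py | count
-- ===== SOURCE A (Python) =====
-- from typing import List
--
-- def count(list: List[str]):
--     list = list.copy()
--     list.sort()
--     counts = {}
--     current_str = list[0]
--     last_change = 0
--     for i in range(1, len(list)):
--         S = list[i]
--         if S != current_str:
--             cnt = i - last_change
--             counts[current_str] = cnt
--             current_str = S
--             last_change = i
--     cnt = len(list) - last_change
--     counts[current_str] = cnt
--
--     return counts
-- ===== SOURCE B (Python) =====
-- from typing import List
--
-- def count(list: List[str]):
--     # One pass: tally into a dict, then emit the keys in sorted order.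
--     tally = {}
--     for s in list:
--         tally[s] = tally.get(s, 0) + 1
--     return {k: tally[k] for k in sorted(tally)}
-- ===== Notes on version B (the rewrite author's own statement) =====
-- stated objective: idiomatic
-- what changed: A copies and sorts the whole list and run-length-scans it by index with current/last_change state; B tallies every string into a dict in one pass and then only sorts the distinct keys to rebuild the result dict.
import Mathlib
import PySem

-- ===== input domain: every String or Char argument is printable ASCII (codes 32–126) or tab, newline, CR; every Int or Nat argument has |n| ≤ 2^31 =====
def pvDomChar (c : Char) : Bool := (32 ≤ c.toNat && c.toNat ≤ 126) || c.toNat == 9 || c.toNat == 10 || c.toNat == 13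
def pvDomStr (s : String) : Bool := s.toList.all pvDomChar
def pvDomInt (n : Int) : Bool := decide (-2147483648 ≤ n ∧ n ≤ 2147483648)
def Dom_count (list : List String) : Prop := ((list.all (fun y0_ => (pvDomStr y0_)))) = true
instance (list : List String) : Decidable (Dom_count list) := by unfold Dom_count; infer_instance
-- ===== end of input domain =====

-- B replaces A's sort-then-run-length scan with a one-pass dict tally followed by a sort of the
-- distinct keys only (simpler; Python proper is not mutated by B, and A mutates only its local copy).

-- ===== PORT A =====
-- sort the copy, scan runs by index, record each run's length when the string changes
def count (list : List String) : List (String × Int) :=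
  let ls := PySem.List.sorted list (fun s => s)
  match PySem.List.pyGet? ls 0 with            -- list[0]: IndexError on [] (excluded by Pre_)
  | none => []
  | some c0 =>
    let st := (PySem.List.pyRange 1 (PySem.List.len ls)).foldl
      (fun (st : PySem.Dict String Int × String × Int) i =>
        let S := PySem.List.pyGetD ls i ""     -- list[i], always in range here
        if S ≠ st.2.1 then (st.1.insert st.2.1 (i - st.2.2), S, i) else st)
      (PySem.Dict.empty, c0, 0)
    (st.1.insert st.2.1 (PySem.List.len ls - st.2.2)).items

-- ===== PORT B =====
-- one pass tallies into a dict; the result dict is rebuilt over the sorted keys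
def count_alt (list : List String) : List (String × Int) :=
  let tally := list.foldl
    (fun (d : PySem.Dict String Int) s => d.insert s (d.getD s 0 + 1)) PySem.Dict.empty
  ((PySem.List.sorted tally.keys (fun k => k)).foldl
    (fun (d : PySem.Dict String Int) k => d.insert k (tally.getD k 0)) PySem.Dict.empty).items

-- ===== PRECONDITION & SPEC =====
-- Pre_ excludes only the empty list, on which A raises IndexError (list[0]).
def Pre_count (list : List String) : Prop := list ≠ []
instance (list : List String) : Decidable (Pre_count list) := by unfold Pre_count; infer_instance
def pvWitness_count : List String := ["b", "a", "b"]

def Spec_count (list : List String) (out : List (String × Int)) : Prop := out = count_alt list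
instance (list : List String) (out : List (String × Int)) : Decidable (Spec_count list out) := by
  unfold Spec_count; infer_instance

-- ===== CLAIM (what is proved, stated in full; the proofs are below) =====
def Claim_equal_count : Prop :=
  ∀ (list : List String), Dom_count list → Pre_count list → Spec_count list (count list)
-- ===== LEMMAS AND PROOFS =====

-- index loop over range(1, len) reading ls[i] = fold over the tail paired with its indices
theorem foldl_pyRange_getD_zipIdx {β : Type} (xs : List String) (f : β → Int → String → β) :
    ∀ (n : Nat) (a : Int), 0 ≤ a → xs.length - a.toNat = n → ∀ (init : β),
    (PySem.List.pyRange a ((xs.length : Int))).foldl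
      (fun st i => f st i (PySem.List.pyGetD xs i "")) init
    = ((xs.drop a.toNat).zipIdx a.toNat).foldl (fun st p => f st (p.2 : Int) p.1) init := by
  intro n
  induction n with
  | zero =>
    intro a ha h init
    have hle : xs.length ≤ a.toNat := by omega
    rw [PySem.List.pyRange_one_eq_nil (by omega), List.drop_eq_nil_of_le hle]
    simp
  | succ n ih =>
    intro a ha h init
    have hlt : a.toNat < xs.length := by omega
    have halt : a < (xs.length : Int) := by omega
    rw [PySem.List.pyRange_one_cons halt, List.drop_eq_getElem_cons hlt,
      List.zipIdx_cons, List.foldl_cons, List.foldl_cons]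
    have hg : PySem.List.pyGetD xs a "" = xs[a.toNat] := by
      conv_lhs => rw [show a = ((a.toNat : Nat) : Int) by omega]
      rw [PySem.List.pyGetD_natCast, List.getD_eq_getElem xs "" hlt]
    rw [show f init a (PySem.List.pyGetD xs a "") = f init ((a.toNat : Nat) : Int) xs[a.toNat] by
      rw [hg]; congr 1; omega]
    have := ih (a + 1) (by omega) (by omega) (f init ((a.toNat : Nat) : Int) xs[a.toNat])
    rw [this, show (a + 1).toNat = a.toNat + 1 by omega]

-- PySem.Set.ofList (= dedup) keeps a sublist of its input
theorem foldl_add_sublist {α : Type} [BEq α] [LawfulBEq α] :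
    ∀ (l s : List α), ∃ t, List.foldl PySem.Set.add s l = s ++ t ∧ t.Sublist l := by
  intro l
  induction l with
  | nil => intro s; exact ⟨[], by simp, List.Sublist.refl _⟩
  | cons x l ih =>
    intro s
    rw [List.foldl_cons]
    by_cases hc : x ∈ s
    · obtain ⟨t, ht, hs⟩ := ih s
      refine ⟨t, ?_, hs.cons x⟩
      rw [show PySem.Set.add s x = s by simp [PySem.Set.add, hc]]
      exact ht
    · obtain ⟨t, ht, hs⟩ := ih (s ++ [x])
      refine ⟨x :: t, ?_, hs.cons₂ x⟩
      rw [show PySem.Set.add s x = s ++ [x] by simp [PySem.Set.add, hc]]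
      simpa using ht

theorem dedup_sublist {α : Type} [BEq α] [LawfulBEq α] (l : List α) :
    (PySem.List.dedup l).Sublist l := by
  obtain ⟨t, ht, hs⟩ := foldl_add_sublist l ([] : List α)
  simpa [PySem.List.dedup, PySem.Set.ofList, PySem.Set.empty, ht] using hs

-- dedup of a cons with a fresh head
theorem cons_foldl_add {α : Type} [BEq α] [LawfulBEq α] :
    ∀ (l : List α) (s : List α) (x : α), x ∉ l →
    List.foldl PySem.Set.add (x :: s) l = x :: List.foldl PySem.Set.add s l := by
  intro l
  induction l with
  | nil => intro s x _; simp
  | cons y l ih =>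
    intro s x hx
    have hxy : y ≠ x := fun h => hx (by simp [h])
    have hx' : x ∉ l := fun h => hx (by simp [h])
    rw [List.foldl_cons, List.foldl_cons]
    by_cases hc : y ∈ s
    · rw [show PySem.Set.add (x :: s) y = x :: s by simp [PySem.Set.add, hc],
        show PySem.Set.add s y = s by simp [PySem.Set.add, hc]]
      exact ih s x hx'
    · rw [show PySem.Set.add (x :: s) y = x :: (s ++ [y]) by
        simp [PySem.Set.add, hc, hxy],
        show PySem.Set.add s y = s ++ [y] by simp [PySem.Set.add, hc]]
      exact ih (s ++ [y]) x hx'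

theorem dedup_cons_of_not_mem {α : Type} [BEq α] [LawfulBEq α] (x : α) (l : List α)
    (h : x ∉ l) : PySem.List.dedup (x :: l) = x :: PySem.List.dedup l := by
  simp only [PySem.List.dedup, PySem.Set.ofList, PySem.Set.empty, List.foldl_cons]
  have : PySem.Set.add ([] : List α) x = [x] := by simp [PySem.Set.add, PySem.Set.contains]
  rw [this]
  exact cons_foldl_add l [] x h

theorem dedup_cons_self {α : Type} [BEq α] [LawfulBEq α] (x : α) (l : List α) :
    PySem.List.dedup (x :: x :: l) = PySem.List.dedup (x :: l) := by
  simp only [PySem.List.dedup, PySem.Set.ofList, PySem.Set.empty, List.foldl_cons]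
  congr 1
  simp [PySem.Set.add, PySem.Set.contains]

-- the loop body of A, on (element, index) pairs
def runF (st : PySem.Dict String Int × String × Int) (p : String × Nat) :
    PySem.Dict String Int × String × Int :=
  if p.1 ≠ st.2.1 then (st.1.insert st.2.1 ((p.2 : Int) - st.2.2), p.1, (p.2 : Int)) else st

-- run-length scan of a sorted tail = one insert per distinct value, with its total count
theorem runs_lemma :
    ∀ (t : List String) (i : Nat) (cur : String) (last : Int) (d : PySem.Dict String Int),
    List.Pairwise (· ≤ ·) (cur :: t) →
    (let st := (t.zipIdx i).foldl runF (d, cur, last)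
     st.1.insert st.2.1 (((i + t.length : Nat) : Int) - st.2.2))
    = (PySem.List.dedup (cur :: t)).foldl
        (fun d k => d.insert k ((if k = cur then (i : Int) - last else 0) + (t.count k : Int))) d := by
  intro t
  induction t with
  | nil =>
    intro i cur last d _
    simp [PySem.List.dedup, PySem.Set.ofList, PySem.Set.empty, PySem.Set.add, PySem.Set.contains]
  | cons S t' ih =>
    intro i cur last d hp
    by_cases hS : S = cur
    · subst hS
      have hp' : List.Pairwise (· ≤ ·) (S :: t') :=
        hp.sublist (by exact (List.sublist_cons_self S t').cons₂ S)
      have hstep : runF (d, S, last) (S, i) = (d, S, last) := by simp [runF]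
      rw [List.zipIdx_cons]
      simp only [List.foldl_cons, hstep]
      have := ih (i + 1) S last d hp'
      simp only at this
      rw [show i + (S :: t').length = (i + 1) + t'.length by simp; omega, this,
        dedup_cons_self]
      apply PySem.List.foldl_congr_mem
      intro acc k _
      by_cases hk : k = S
      · subst hk; simp; ring_nf
      · simp [hk, Ne.symm hk]
    · -- new run starts at i
      have hcur_le : ∀ x ∈ S :: t', cur ≤ x := fun x hx => (List.pairwise_cons.mp hp).1 x hx
      have hScons : List.Pairwise (· ≤ ·) (S :: t') :=
        hp.sublist (List.sublist_cons_self cur (S :: t'))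
      have hS_le : ∀ x ∈ t', S ≤ x := fun x hx => (List.pairwise_cons.mp hScons).1 x hx
      have hcur_notmem : cur ∉ S :: t' := by
        intro hmem
        rcases List.mem_cons.mp hmem with h | h
        · exact hS h.symm
        · have h1 : cur ≤ S := hcur_le S (by simp)
          have h2 : S ≤ cur := hS_le cur h
          exact hS (le_antisymm h2 h1)
      have hstep : runF (d, cur, last) (S, i) =
          (d.insert cur ((i : Int) - last), S, (i : Int)) := by
        simp [runF, hS]
      rw [List.zipIdx_cons]
      simp only [List.foldl_cons, hstep]
      have := ih (i + 1) S (i : Int) (d.insert cur ((i : Int) - last)) hScons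
      simp only at this
      rw [show i + (S :: t').length = (i + 1) + t'.length by simp; omega, this,
        dedup_cons_of_not_mem cur (S :: t') hcur_notmem, List.foldl_cons]
      have hnotcount : (S :: t').count cur = 0 := List.count_eq_zero.mpr hcur_notmem
      have hinit : d.insert cur ((if cur = cur then (i : Int) - last else 0)
          + ((S :: t').count cur : Int)) = d.insert cur ((i : Int) - last) := by
        simp [hnotcount]
      rw [hinit]
      apply PySem.List.foldl_congr_mem
      intro acc k hk
      have hkmem : k ∈ S :: t' := by
        have := PySem.List.mem_dedup (S :: t') k
        exact this.mp hk
      have hkne : k ≠ cur := fun h => hcur_notmem (h ▸ hkmem)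
      by_cases hkS : k = S
      · subst hkS; simp [hkne]; ring_nf
      · simp [hkne, hkS, Ne.symm hkS]

-- A computes the sorted distinct values, each with its multiplicity in the sorted copy
theorem count_char (list : List String) (h : list ≠ []) :
    count list = (PySem.List.dedup (PySem.List.sorted list (fun s => s))).map
      (fun k => (k, ((PySem.List.sorted list (fun s => s)).count k : Int))) := by
  set ls := PySem.List.sorted list (fun s => s) with hls
  have hne : ls ≠ [] := by
    intro h0
    have := (PySem.List.sorted_perm list (fun s => s) false).length_eq
    rw [← hls, h0] at this
    exact h (List.eq_nil_of_length_eq_zero (by simpa using this.symm))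
  obtain ⟨c0, t, hct⟩ := List.exists_cons_of_ne_nil hne
  have hpair : List.Pairwise (· ≤ ·) ls := by
    have := PySem.List.sorted_pairwise list (fun s => s)
    simpa [← hls] using this
  unfold count
  rw [← hls, hct]
  have hget : PySem.List.pyGet? (c0 :: t) 0 = some c0 := by
    simp [PySem.List.pyGet?, PySem.List.pyIdx?]
  simp only [hget, PySem.List.len]
  have hbridge := foldl_pyRange_getD_zipIdx (c0 :: t)
    (fun (st : PySem.Dict String Int × String × Int) i S =>
      if S ≠ st.2.1 then (st.1.insert st.2.1 (i - st.2.2), S, i) else st)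
    ((c0 :: t).length - 1) 1 (by omega) (by simp) (PySem.Dict.empty, c0, 0)
  simp only [List.drop_succ_cons, List.drop_zero, Int.toNat_one] at hbridge
  rw [hbridge]
  have hfold : ∀ st : PySem.Dict String Int × String × Int,
      (t.zipIdx 1).foldl (fun st p =>
        if p.1 ≠ st.2.1 then (st.1.insert st.2.1 ((p.2 : Int) - st.2.2), p.1, (p.2 : Int)) else st)
        st = (t.zipIdx 1).foldl runF st := by
    intro st
    apply PySem.List.foldl_congr_mem
    intro acc p _
    simp [runF]
  rw [hfold]
  have hlen : (((c0 :: t).length : Nat) : Int) = (((1 + t.length : Nat)) : Int) := by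
    push_cast
    simp
    omega
  rw [hlen]
  have hruns := runs_lemma t 1 c0 0 PySem.Dict.empty (by rw [hct] at hpair; exact hpair)
  simp only at hruns
  rw [hruns]
  rw [PySem.Dict.items_foldl_insert_fresh _ _ _ _
    (fun a _ => PySem.Dict.contains_empty a)
    (by simp)]
  have hitems : PySem.Dict.empty.items = ([] : List (String × Int)) := by
    simp [PySem.Dict.empty]
  rw [hitems, List.nil_append]
  apply List.map_congr_left
  intro k _
  by_cases hk : k = c0
  · subst hk; simp; omega
  · simp [hk, Ne.symm hk]

-- B computes the sorted distinct values of the input, each with its multiplicity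
theorem count_alt_char (list : List String) :
    count_alt list = (PySem.List.sorted (PySem.List.dedup list) (fun k => k)).map
      (fun k => (k, (list.count k : Int))) := by
  unfold count_alt
  set tally := list.foldl
    (fun (d : PySem.Dict String Int) s => d.insert s (d.getD s 0 + 1)) PySem.Dict.empty
    with htally
  have hkeys : tally.keys = PySem.List.dedup list := by
    rw [htally, PySem.Dict.keys_foldl_insert]
    have : (PySem.Dict.empty : PySem.Dict String Int).keys = [] := by
      simp [PySem.Dict.empty, PySem.Dict.keys]
    rw [this]
    rfl
  have hgetD : ∀ k, tally.getD k 0 = (list.count k : Int) := by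
    intro k
    rw [htally, PySem.Dict.getD_foldl_insert_add_one, PySem.Dict.getD_empty, zero_add]
  set ks := PySem.List.sorted tally.keys (fun k => k) with hks
  have hnodup : ks.Nodup := by
    have hperm := PySem.List.sorted_perm tally.keys (fun k => k) false
    rw [← hks] at hperm
    refine hperm.symm.nodup ?_
    rw [hkeys]
    exact PySem.List.nodup_dedup list
  rw [PySem.Dict.items_foldl_insert_fresh _ _ _ _
    (fun a _ => PySem.Dict.contains_empty a) (by simpa using hnodup)]
  have hitems : PySem.Dict.empty.items = ([] : List (String × Int)) := by
    simp [PySem.Dict.empty]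
  rw [hitems, List.nil_append, hkeys]
  apply List.map_congr_left
  intro k _
  rw [hgetD]

-- the two key orders coincide: sorted(distinct of input) = distinct of sorted(input)
theorem sorted_dedup_eq (list : List String) :
    PySem.List.sorted (PySem.List.dedup list) (fun k => k)
    = PySem.List.dedup (PySem.List.sorted list (fun s => s)) := by
  set ls := PySem.List.sorted list (fun s => s) with hls
  apply PySem.List.sorted_eq_of_perm_of_pairwise_lt
  · rw [List.perm_ext_iff_of_nodup (PySem.List.nodup_dedup ls) (PySem.List.nodup_dedup list)]
    intro a
    rw [PySem.List.mem_dedup, PySem.List.mem_dedup]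
    exact (PySem.List.sorted_perm list (fun s => s) false).mem_iff
  · have hpair : List.Pairwise (· ≤ ·) ls := by
      have := PySem.List.sorted_pairwise list (fun s => s)
      simpa [← hls] using this
    have hsub : (PySem.List.dedup ls).Sublist ls := dedup_sublist ls
    have hle : List.Pairwise (· ≤ ·) (PySem.List.dedup ls) := hpair.sublist hsub
    have hne : List.Pairwise (· ≠ ·) (PySem.List.dedup ls) := PySem.List.nodup_dedup ls
    exact (hle.and hne).imp (fun ⟨h1, h2⟩ => lt_of_le_of_ne h1 h2)

-- ===== VERDICT (by name: the statement is the Claim_ definition above) =====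
theorem count_spec : Claim_equal_count := by
  intro list _ hpre
  unfold Spec_count
  rw [count_char list hpre, count_alt_char list, sorted_dedup_eq]
  apply List.map_congr_left
  intro k _
  rw [(PySem.List.sorted_perm list (fun s => s) false).count_eq]
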